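-- pv_equiv track=rewrite | github.com/obhutara/Python | 732A74_Lab3B_omkbh878_tejma768/generate_text.py | wordcollectioncounter
-- ===== SOURCE A (Python) =====
-- import collections
--
-- def wordcollectioncounter(words, p = True):
-- 	count = collections.Counter()
-- 	wordfreq = []
-- 	for i,ind in enumerate(words):
-- 		ind = words[i]
-- 		count[ind]+= 1
-- 		[wordfreq.append(count[ind])]
-- 	wordfreq = list(zip(words, wordfreq))
-- 	wordfreq = list(set(wordfreq))
-- 	wordfreq = sorted(wordfreq, key = lambda x: (-x[1], x[0]))
-- 	return wordfreq
-- ===== SOURCE B (Python) =====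
-- import collections
--
-- def wordcollectioncounter(words, p = True):
--     freq = collections.Counter(words)
--     pairs = [(w, k) for w in freq for k in range(1, freq[w] + 1)]
--     return sorted(pairs, key=lambda x: (-x[1], x[0]))
-- ===== Notes on version B (the rewrite author's own statement) =====
-- stated objective: simpler
-- what changed: B builds a Counter once and expands each distinct word into the pairs (w,1..freq[w]) before the final sort, replacing A's per-occurrence running-count accumulation, zip and redundant set() dedup.
import Mathlib
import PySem

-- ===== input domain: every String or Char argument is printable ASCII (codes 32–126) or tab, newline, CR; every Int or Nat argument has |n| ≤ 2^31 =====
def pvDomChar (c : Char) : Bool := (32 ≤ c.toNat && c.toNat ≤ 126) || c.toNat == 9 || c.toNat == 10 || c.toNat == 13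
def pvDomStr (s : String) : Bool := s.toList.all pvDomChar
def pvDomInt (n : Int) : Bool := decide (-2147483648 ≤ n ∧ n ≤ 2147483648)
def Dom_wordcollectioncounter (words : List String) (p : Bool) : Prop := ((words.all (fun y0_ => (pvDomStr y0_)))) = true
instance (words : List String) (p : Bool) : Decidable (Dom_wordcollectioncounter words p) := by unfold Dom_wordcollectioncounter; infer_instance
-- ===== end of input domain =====

-- B replaces A's per-occurrence running-count/zip/set accumulation by Counter + range expansion over distinct words (simpler decomposition, same cost).

-- ===== PORT A =====
def wordcollectioncounter (words : List String) (p : Bool) : List (String × Int) :=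
  -- for i, ind in enumerate(words): ind = words[i]  (rebinds the enumerated element: words[i] IS ind); count[ind] += 1; wordfreq.append(count[ind])
  let st :=
    (PySem.List.enumerate words).foldl
      (fun (s : PySem.Dict String Int × List Int) iw =>
        let ind := iw.2
        let count := s.1.modify ind 0 (· + 1)
        (count, s.2 ++ [count.getD ind 0]))
      (PySem.Dict.empty, [])
  let wordfreq := words.zip st.2
  let wordfreq := PySem.Set.ofList wordfreq
  PySem.List.sorted2 wordfreq (fun x => -x.2) (fun x => x.1)

-- ===== PORT B =====
def wordcollectioncounter_alt (words : List String) (p : Bool) : List (String × Int) :=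
  let freq := PySem.Dict.counter words
  let pairs := freq.keys.flatMap (fun w =>
    (PySem.List.pyRange 1 (freq.getD w 0 + 1)).map (fun k => (w, k)))
  PySem.List.sorted2 pairs (fun x => -x.2) (fun x => x.1)

-- ===== PRECONDITION & SPEC =====
def Spec_wordcollectioncounter (words : List String) (p : Bool) (out : List (String × Int)) : Prop := out = wordcollectioncounter_alt words p
instance (words : List String) (p : Bool) (out : List (String × Int)) : Decidable (Spec_wordcollectioncounter words p out) := by unfold Spec_wordcollectioncounter; infer_instance

-- ===== CLAIM (what is proved, stated in full; the proofs are below) =====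
def Claim_equal_wordcollectioncounter : Prop := ∀ (words : List String) (p : Bool), Dom_wordcollectioncounter words p → Spec_wordcollectioncounter words p (wordcollectioncounter words p)

-- ===== LEMMAS AND PROOFS =====

-- prefix counts: k-th element is the count of l[k] in l[0..k], continuing from dict d
def pvCnts : List String → PySem.Dict String Int → List Int
  | [], _ => []
  | x :: xs, d => (d.getD x 0 + 1) :: pvCnts xs (d.modify x 0 (· + 1))

theorem pvLoopA (l : List String) (i : Int) (d : PySem.Dict String Int) (acc : List Int) :
    ((PySem.List.enumerate l i).foldl
      (fun (s : PySem.Dict String Int × List Int) iw =>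
        let ind := iw.2
        let count := s.1.modify ind 0 (· + 1)
        (count, s.2 ++ [count.getD ind 0]))
      (d, acc)).2 = acc ++ pvCnts l d := by
  induction l generalizing i d acc with
  | nil => simp [PySem.List.enumerate, pvCnts]
  | cons x xs ih =>
    rw [PySem.List.enumerate_cons]
    simp only [List.foldl_cons, pvCnts]
    rw [ih]
    simp [PySem.Dict.getD_modify_self]

theorem pvMemZipCnts (l : List String) (d : PySem.Dict String Int) (w : String) (k : Int) :
    (w, k) ∈ l.zip (pvCnts l d) ↔
      w ∈ l ∧ d.getD w 0 + 1 ≤ k ∧ k ≤ d.getD w 0 + (l.count w : Int) := by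
  induction l generalizing d with
  | nil => simp
  | cons x xs ih =>
    by_cases hw : w = x
    · subst hw
      have hc0 : (0:Int) ≤ (xs.count w : Int) := Int.natCast_nonneg _
      simp only [pvCnts, List.zip_cons_cons, List.mem_cons, Prod.mk.injEq, ih,
        PySem.Dict.getD_modify_self, List.count_cons, beq_self_eq_true, if_true]
      push_cast
      constructor
      · rintro (⟨-, rfl⟩ | ⟨hm, h1, h2⟩)
        · exact ⟨Or.inl trivial, by omega, by omega⟩
        · exact ⟨Or.inr hm, by omega, by omega⟩
      · rintro ⟨-, h1, h2⟩
        by_cases hk : k = d.getD w 0 + 1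
        · exact Or.inl ⟨trivial, hk⟩
        · have hpos : (0:Int) < (xs.count w : Int) := by omega
          have hmem : w ∈ xs := List.count_pos_iff.mp (by exact_mod_cast hpos)
          exact Or.inr ⟨hmem, by omega, by omega⟩
    · have hbe : (x == w) = false := beq_eq_false_iff_ne.mpr (Ne.symm hw)
      simp only [pvCnts, List.zip_cons_cons, List.mem_cons, Prod.mk.injEq, ih,
        PySem.Dict.getD_modify_of_ne _ _ _ hw, List.count_cons, hbe]
      simp [hw]

theorem pvNodupZipCnts (l : List String) (d : PySem.Dict String Int) :
    (l.zip (pvCnts l d)).Nodup := by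
  induction l generalizing d with
  | nil => simp
  | cons x xs ih =>
    simp only [pvCnts, List.zip_cons_cons, List.nodup_cons]
    refine ⟨fun hmem => ?_, ih _⟩
    rw [pvMemZipCnts] at hmem
    rw [PySem.Dict.getD_modify_self] at hmem
    omega

theorem pvSorted2EqSortedLex {α κ₁ κ₂ : Type} [LinearOrder κ₁] [LinearOrder κ₂]
    (xs : List α) (k1 : α → κ₁) (k2 : α → κ₂) :
    PySem.List.sorted2 xs k1 k2 = PySem.List.sorted xs (fun x => toLex (k1 x, k2 x)) := by
  rw [PySem.List.sorted_eq_foldl_insertBy]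
  simp only [PySem.List.sorted2]
  norm_num
  congr 1
  funext acc x
  congr 1
  funext a b
  rcases lt_trichotomy (k1 a) (k1 b) with h|h|h
  · simp [Prod.Lex.lt_iff, h, not_lt.mpr (le_of_lt h)]
  · simp [Prod.Lex.lt_iff, h]
  · simp [Prod.Lex.lt_iff, not_lt.mpr (le_of_lt h), h.ne']
    exact fun hc => absurd hc (not_le.mpr h)

-- ===== VERDICT (by name: the statement is the Claim_ definition above) =====
theorem wordcollectioncounter_spec : Claim_equal_wordcollectioncounter := by
  intro words p _
  unfold Spec_wordcollectioncounter wordcollectioncounter wordcollectioncounter_alt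
  simp only []
  rw [pvSorted2EqSortedLex, pvSorted2EqSortedLex]
  apply PySem.List.sorted_eq_sorted_of_perm
  · intro a b h
    have h' := congrArg ofLex h
    simp only [ofLex_toLex, Prod.mk.injEq, neg_inj] at h'
    exact Prod.ext h'.2 h'.1
  · rw [pvLoopA, List.nil_append,
      PySem.Set.ofList_eq_self_of_nodup _ (pvNodupZipCnts words PySem.Dict.empty)]
    rw [List.perm_ext_iff_of_nodup (pvNodupZipCnts words PySem.Dict.empty) ?_]
    · rintro ⟨w, k⟩
      rw [pvMemZipCnts]
      simp only [List.mem_flatMap, List.mem_map, PySem.Dict.keys_counter,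
        PySem.Set.mem_ofList, PySem.Dict.getD_counter, PySem.Dict.getD_empty]
      constructor
      · rintro ⟨hw, h1, h2⟩
        exact ⟨w, hw, k, PySem.List.mem_pyRange_one.mpr ⟨by omega, by omega⟩, rfl⟩
      · rintro ⟨w', hw', k', hk', heq⟩
        obtain ⟨rfl, rfl⟩ := Prod.mk.injEq .. ▸ heq
        have := PySem.List.mem_pyRange_one.mp hk'
        exact ⟨hw', by omega, by omega⟩
    · rw [List.nodup_flatMap]
      constructor
      · intro x _
        exact (PySem.List.nodup_pyRange_one _ _).map
          (fun a b hab => by simpa using congrArg Prod.snd hab)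
      · have hk : ((PySem.Dict.counter words).keys).Nodup := by
          rw [PySem.Dict.keys_counter]; exact PySem.Set.nodup_ofList words
        refine hk.pairwise_of_forall_ne ?_
        intro a b _ _ hne q hqa hqb
        simp only [List.mem_map] at hqa hqb
        obtain ⟨_, -, rfl⟩ := hqa
        obtain ⟨_, -, heq⟩ := hqb
        exact hne (congrArg Prod.fst heq).symm
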